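-- pv_equiv track=rewrite | github.com/Krandheer/data-structure | diameter_of_graph.py | dfs
-- ===== SOURCE A (Python) =====
-- def dfs(graph, node, visited=None):
--     """this function calculates the diameter of graph using dfs method"""
--     if not visited:
--         visited = set()
--     visited.add(node)
--     temp = 0
--     for child in graph[node]:
--         if child not in visited:
--             temp = max(temp, dfs(graph, child, visited))
--
--     return temp + 1
-- ===== SOURCE B (Python) =====
-- def dfs(graph, node, visited=None):
--     """Iterative version: explicit stack instead of recursion; same pre-order
--     marking of the shared `visited` set, same return value."""
--     if not visited:
--         visited = set()
--     visited.add(node)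
--     stack = [(node, list(graph[node]), 0)]
--     result = 0
--     while stack:
--         n, children, best = stack.pop()
--         i = 0
--         while i < len(children) and children[i] in visited:
--             i += 1
--         if i < len(children):
--             c = children[i]
--             visited.add(c)
--             stack.append((n, children[i + 1:], best))
--             stack.append((c, list(graph[c]), 0))
--         else:
--             height = best + 1
--             if stack:
--                 pn, pcs, pb = stack.pop()
--                 stack.append((pn, pcs, max(pb, height)))
--             else:
--                 result = height
--     return result
-- ===== Notes on version B (the rewrite author's own statement) =====
-- stated objective: alternative
-- what changed: Replaces A's recursive DFS with an iterative DFS that maintains an explicit stack of (node, remaining children, best child height) frames and propagates each finished node's height to its parent on pop.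
import Mathlib
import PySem

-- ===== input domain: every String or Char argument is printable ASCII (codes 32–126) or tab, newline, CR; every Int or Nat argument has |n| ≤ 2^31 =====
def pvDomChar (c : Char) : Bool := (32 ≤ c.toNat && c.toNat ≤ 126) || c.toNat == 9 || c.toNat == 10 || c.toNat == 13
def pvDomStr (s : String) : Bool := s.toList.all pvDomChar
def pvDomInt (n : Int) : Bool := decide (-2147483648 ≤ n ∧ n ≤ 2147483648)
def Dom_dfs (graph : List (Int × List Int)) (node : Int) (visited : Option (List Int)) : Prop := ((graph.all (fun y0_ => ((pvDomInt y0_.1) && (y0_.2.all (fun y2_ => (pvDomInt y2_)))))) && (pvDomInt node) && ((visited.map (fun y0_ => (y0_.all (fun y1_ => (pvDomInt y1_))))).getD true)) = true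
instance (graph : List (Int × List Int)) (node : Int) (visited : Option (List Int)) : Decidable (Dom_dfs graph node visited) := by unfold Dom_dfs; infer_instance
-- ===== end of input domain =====

-- B replaces A's recursive DFS by an iterative DFS over an explicit stack of
-- (node, remaining children, best child height) frames (objective: alternative).
-- Both Pythons mutate the caller's `visited` set identically (pre-order, same child
-- order); the equivalence proved here is about the RETURN value.

-- graph[x] : dict lookup, shared by both ports (first match; none = KeyError)
def adjOf (g : List (Int × List Int)) (c : Int) : Option (List Int) :=
  PySem.Dict.get? (PySem.Dict.mk g) c

-- ===== PORT A =====
-- `if not visited: visited = set()` — None and the empty set both give []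
def initVisited (visited : Option (List Int)) : List Int :=
  match visited with
  | none => []
  | some l => PySem.Set.ofList l

mutual
  -- fuel counts recursion depth; graph.length + 1 always suffices (proved below)
  def dfsRecA : Nat → List (Int × List Int) → Int → List Int → Int × List Int
    | 0, _, _, v => (1, v)
    | f + 1, g, n, v =>
      let v1 := PySem.Set.add v n
      match adjOf g n with
      | none => (1, v1)        -- graph[node] raises KeyError in Python: outside Pre_dfs
      | some cs =>
        let r := childLoopA f g cs 0 v1
        (r.1 + 1, r.2)
  termination_by f _ _ _ => (f, 0)
  -- the `for child in graph[node]` loop, threading (temp, visited)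
  def childLoopA : Nat → List (Int × List Int) → List Int → Int → List Int → Int × List Int
    | _, _, [], t, v => (t, v)
    | f, g, c :: cs, t, v =>
      if c ∈ v then childLoopA f g cs t v
      else
        let r := dfsRecA f g c v
        childLoopA f g cs (max t r.1) r.2
  termination_by f _ cs _ _ => (f, cs.length + 1)
end

def dfs (graph : List (Int × List Int)) (node : Int) (visited : Option (List Int)) : Int :=
  (dfsRecA (graph.length + 1) graph node (initVisited visited)).1

-- ===== PORT B =====
-- Source B's inner `while` that skips already-visited children: first unvisited child
-- together with the children that remain after it
def splitFirstUnvisited : List Int → List Int → Option (Int × List Int)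
  | [], _ => none
  | c :: cs, v => if c ∈ v then splitFirstUnvisited cs v else some (c, cs)

-- fuel bookkeeping for runB: total adjacency length of the unvisited keys …
def unvisitedAdjSum (g : List (Int × List Int)) (v : List Int) : Nat :=
  (((PySem.List.dedup (g.map Prod.fst)).filter (fun k => !(v.contains k))).map
    (fun k => ((adjOf g k).getD []).length)).sum

-- … plus the children still on the stack: an upper bound on future pushes
def phiB (g : List (Int × List Int)) (stack : List (Int × List Int × Int)) (v : List Int) : Nat :=
  (stack.map (fun fr => fr.2.1.length)).sum + unvisitedAdjSum g v

-- Source B's `while stack` loop; fuel is consumed only when a new node is pushed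
def runB (g : List (Int × List Int)) (fuel : Nat) (stack : List (Int × List Int × Int))
    (v : List Int) (res : Int) : Int :=
  match stack with
  | [] => res
  | (n, children, best) :: st =>
    match splitFirstUnvisited children v with
    | some (c, rest) =>
      match fuel with
      | 0 => res               -- fuel exhaustion: unreachable for the fuel dfs_alt supplies
      | f + 1 =>
        runB g f ((c, (adjOf g c).getD [], 0) :: (n, rest, best) :: st) (PySem.Set.add v c) res
    | none =>
      match st with
      | (pn, pcs, pb) :: st' => runB g fuel ((pn, pcs, max pb (best + 1)) :: st') v res
      | [] => runB g fuel [] v (best + 1)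
termination_by (fuel, (stack.map (fun fr => fr.2.1.length + 1)).sum)
decreasing_by
  · exact Prod.Lex.left _ _ (Nat.lt_succ_self _)
  · apply Prod.Lex.right; simp
  · apply Prod.Lex.right; simp

def dfs_alt (graph : List (Int × List Int)) (node : Int) (visited : Option (List Int)) : Int :=
  let v1 := PySem.Set.add (initVisited visited) node
  let adj := (adjOf graph node).getD []   -- graph[node]: KeyError outside Pre_dfs
  let st0 : List (Int × List Int × Int) := [(node, adj, 0)]
  runB graph (phiB graph st0 v1 + 1) st0 v1 0

-- ===== PRECONDITION & SPEC =====
-- one BFS round of graph reachability, skipping initially-visited nodes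
def reachStep (g : List (Int × List Int)) (v0 : List Int) (R : List Int) : List Int :=
  R.foldl (fun acc u =>
    match adjOf g u with
    | none => acc
    | some adj => adj.foldl (fun acc2 c => if c ∈ v0 ∨ c ∈ acc2 then acc2 else acc2 ++ [c]) acc) R

-- bounded reachability closure (g.length + 1 rounds always reach the fixpoint):
-- the set of nodes Python A looks up in `graph`
def reachN (g : List (Int × List Int)) (v0 : List Int) : Nat → List Int → List Int
  | 0, R => R
  | k + 1, R => reachN g v0 k (reachStep g v0 R)

-- Pre_dfs holds exactly when every node reachable from `node` (not passing through
-- initially-visited nodes) is a key of graph; otherwise Python A raises KeyError.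
def Pre_dfs (graph : List (Int × List Int)) (node : Int) (visited : Option (List Int)) : Prop :=
  ∀ x ∈ reachN graph (visited.getD []) (graph.length + 1) [node], x ∈ graph.map Prod.fst

instance (graph : List (Int × List Int)) (node : Int) (visited : Option (List Int)) : Decidable (Pre_dfs graph node visited) := by unfold Pre_dfs; infer_instance

def pvWitness_dfs : (List (Int × List Int)) × Int × Option (List Int) :=
  ([(0, [1]), (1, [])], 0, none)

def Spec_dfs (graph : List (Int × List Int)) (node : Int) (visited : Option (List Int)) (out : Int) : Prop := out = dfs_alt graph node visited
instance (graph : List (Int × List Int)) (node : Int) (visited : Option (List Int)) (out : Int) : Decidable (Spec_dfs graph node visited out) := by unfold Spec_dfs; infer_instance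

-- ===== CLAIM (what is proved, stated in full; the proofs are below) =====
def Claim_equal_dfs : Prop := ∀ (graph : List (Int × List Int)) (node : Int) (visited : Option (List Int)), Dom_dfs graph node visited → Pre_dfs graph node visited → Spec_dfs graph node visited (dfs graph node visited)

-- ===== LEMMAS AND PROOFS =====

-- keys of the graph not yet visited
def kn (g : List (Int × List Int)) (v : List Int) : List Int :=
  (PySem.List.dedup (g.map Prod.fst)).filter (fun k => !(v.contains k))

-- number of such keys: the termination measure of the reference DFS
def uK (g : List (Int × List Int)) (v : List Int) : Nat := (kn g v).length

theorem unvisitedAdjSum_eq_kn (g : List (Int × List Int)) (v : List Int) :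
    unvisitedAdjSum g v = ((kn g v).map (fun k => ((adjOf g k).getD []).length)).sum := rfl

theorem not_mem_keys_of_adjOf_none (g : List (Int × List Int)) (c : Int)
    (h : adjOf g c = none) : c ∉ g.map Prod.fst := by
  rw [adjOf, PySem.Dict.get?_eq_none_iff_not_mem_keys] at h
  simpa using h

theorem mem_keys_of_adjOf_some (g : List (Int × List Int)) (c : Int) (cs : List Int)
    (h : adjOf g c = some cs) : c ∈ g.map Prod.fst := by
  by_contra hmem
  have : adjOf g c = none := by
    rw [adjOf, PySem.Dict.get?_eq_none_iff_not_mem_keys]; simpa using hmem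
  rw [this] at h; cases h

theorem kn_add_nonkey (g : List (Int × List Int)) (v : List Int) (c : Int)
    (hk : adjOf g c = none) : kn g (PySem.Set.add v c) = kn g v := by
  have hck := not_mem_keys_of_adjOf_none g c hk
  unfold kn
  by_cases hv : c ∈ v
  · rw [PySem.Set.add_of_mem hv]
  · rw [PySem.Set.add_of_not_mem hv]
    apply List.filter_congr
    intro k hk2
    have hne : k ≠ c := fun h => hck (h ▸ (PySem.List.mem_dedup _ _).1 hk2)
    simp [hne]

theorem kn_mem (g : List (Int × List Int)) (v : List Int) (c : Int) (cs : List Int)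
    (hk : adjOf g c = some cs) (hc : c ∉ v) : c ∈ kn g v := by
  rw [kn, List.mem_filter]
  exact ⟨(PySem.List.mem_dedup _ _).2 (mem_keys_of_adjOf_some g c cs hk), by simp [hc]⟩

theorem kn_add_key (g : List (Int × List Int)) (v : List Int) (c : Int) (cs : List Int)
    (hk : adjOf g c = some cs) (hc : c ∉ v) :
    (kn g v).Perm (c :: kn g (PySem.Set.add v c)) := by
  have hstep : kn g (PySem.Set.add v c) = (kn g v).filter (fun k => !(k == c)) := by
    unfold kn
    rw [PySem.Set.add_of_not_mem hc, List.filter_filter]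
    apply List.filter_congr
    intro k _
    by_cases hkc : k = c
    · subst hkc; simp
    · simp [hkc]
  have hnd : (kn g v).Nodup := (PySem.List.nodup_dedup _).filter _
  have herase : kn g (PySem.Set.add v c) = (kn g v).erase c := by
    rw [hstep, hnd.erase_eq_filter]
    apply List.filter_congr
    intro k _
    by_cases hkc : k = c <;> simp [hkc, bne]
  rw [herase]
  exact List.perm_cons_erase (kn_mem g v c cs hk hc)

theorem uK_add_nonkey (g : List (Int × List Int)) (v : List Int) (c : Int)
    (hk : adjOf g c = none) : uK g (PySem.Set.add v c) = uK g v := by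
  unfold uK; rw [kn_add_nonkey g v c hk]

theorem uK_add_key_lt (g : List (Int × List Int)) (v : List Int) (c : Int) (cs : List Int)
    (hk : adjOf g c = some cs) (hc : c ∉ v) : uK g (PySem.Set.add v c) < uK g v := by
  have := (kn_add_key g v c cs hk hc).length_eq
  simp only [List.length_cons] at this
  unfold uK; omega

theorem uK_mono (g : List (Int × List Int)) (v w : List Int)
    (h : ∀ x ∈ v, x ∈ w) : uK g w ≤ uK g v := by
  unfold uK kn
  simp only [← List.countP_eq_length_filter]
  apply List.countP_mono_left
  intro k _ hkw
  simp only [Bool.not_eq_eq_eq_not, Bool.not_true, List.contains_eq_mem,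
    decide_eq_false_iff_not] at hkw ⊢
  exact fun hkv => hkw (h k hkv)

theorem W_add_nonkey (g : List (Int × List Int)) (v : List Int) (c : Int)
    (hk : adjOf g c = none) : unvisitedAdjSum g (PySem.Set.add v c) = unvisitedAdjSum g v := by
  rw [unvisitedAdjSum_eq_kn, unvisitedAdjSum_eq_kn, kn_add_nonkey g v c hk]

theorem W_add_key (g : List (Int × List Int)) (v : List Int) (c : Int) (cs : List Int)
    (hk : adjOf g c = some cs) (hc : c ∉ v) :
    unvisitedAdjSum g v = cs.length + unvisitedAdjSum g (PySem.Set.add v c) := by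
  have := ((kn_add_key g v c cs hk hc).map (fun k => ((adjOf g k).getD []).length)).sum_eq
  rw [unvisitedAdjSum_eq_kn, unvisitedAdjSum_eq_kn, this]
  simp [hk]

-- reference DFS: the denotation both ports compute; the carried proof (visited only
-- grows) feeds the termination measure
def refGo (g : List (Int × List Int)) (cs : List Int) (v : List Int) (t : Int) :
    { r : Int × List Int // ∀ x ∈ v, x ∈ r.2 } :=
  match cs with
  | [] => ⟨(t, v), fun _ hx => hx⟩
  | c :: cs' =>
    if hc : c ∈ v then refGo g cs' v t
    else
      match hk : adjOf g c with
      | none =>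
        let r := refGo g cs' (PySem.Set.add v c) (max t 1)
        ⟨r.1, fun x hx => r.2 x (by rw [PySem.Set.mem_add]; exact Or.inl hx)⟩
      | some ccs =>
        let r1 := refGo g ccs (PySem.Set.add v c) 0
        let r2 := refGo g cs' r1.1.2 (max t (r1.1.1 + 1))
        ⟨r2.1, fun x hx => r2.2 x (r1.2 x (by rw [PySem.Set.mem_add]; exact Or.inl hx))⟩
termination_by (uK g v, cs.length)
decreasing_by
  · exact Prod.Lex.right _ (Nat.lt_succ_self _)
  · rw [uK_add_nonkey g v c hk]; exact Prod.Lex.right _ (Nat.lt_succ_self _)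
  · exact Prod.Lex.left _ _ (uK_add_key_lt g v c ccs hk hc)
  · exact Prod.Lex.left _ _ (Nat.lt_of_le_of_lt (uK_mono g _ _ r1.2) (uK_add_key_lt g v c ccs hk hc))

def refRun (g : List (Int × List Int)) (cs : List Int) (v : List Int) (t : Int) : Int × List Int :=
  (refGo g cs v t).1

theorem refRun_nil (g : List (Int × List Int)) (v : List Int) (t : Int) :
    refRun g [] v t = (t, v) := by
  unfold refRun; rw [refGo.eq_def]

theorem refRun_cons_mem (g : List (Int × List Int)) {c : Int} {v : List Int} (hc : c ∈ v)
    (cs : List Int) (t : Int) : refRun g (c :: cs) v t = refRun g cs v t := by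
  unfold refRun; rw [refGo.eq_def]; dsimp only; rw [dif_pos hc]

theorem refRun_cons_nonkey (g : List (Int × List Int)) {c : Int} {v : List Int} (hc : c ∉ v)
    (hk : adjOf g c = none) (cs : List Int) (t : Int) :
    refRun g (c :: cs) v t = refRun g cs (PySem.Set.add v c) (max t 1) := by
  unfold refRun; rw [refGo.eq_def]; dsimp only; rw [dif_neg hc]
  split
  · rfl
  · next ccs h => rw [hk] at h; cases h

theorem refRun_cons_key (g : List (Int × List Int)) {c : Int} {v : List Int} (hc : c ∉ v)
    {ccs : List Int} (hk : adjOf g c = some ccs) (cs : List Int) (t : Int) :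
    refRun g (c :: cs) v t =
      refRun g cs (refRun g ccs (PySem.Set.add v c) 0).2
        (max t ((refRun g ccs (PySem.Set.add v c) 0).1 + 1)) := by
  unfold refRun; rw [refGo.eq_def]; dsimp only; rw [dif_neg hc]
  split
  · next h => rw [hk] at h; cases h
  · next ccs' h =>
    rw [hk] at h
    cases h
    rfl

-- what the B machine will compute from a given stack, phrased with refRun
def denote (g : List (Int × List Int)) : List (Int × List Int × Int) → List Int → Int → Int
  | [], _, res => res
  | (_, cs, b) :: st, v, res =>
    let r := refRun g cs v b
    match st with
    | [] => r.1 + 1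
    | (pn, pcs, pb) :: st' => denote g ((pn, pcs, max pb (r.1 + 1)) :: st') r.2 res
termination_by stack => stack.length

theorem denote_nil (g : List (Int × List Int)) (v : List Int) (res : Int) :
    denote g [] v res = res := by rw [denote]

theorem denote_single (g : List (Int × List Int)) (n : Int) (cs : List Int) (b : Int)
    (v : List Int) (res : Int) :
    denote g [(n, cs, b)] v res = (refRun g cs v b).1 + 1 := by rw [denote]

theorem denote_cons2 (g : List (Int × List Int)) (n : Int) (cs : List Int) (b : Int)
    (pn : Int) (pcs : List Int) (pb : Int) (st' : List (Int × List Int × Int))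
    (v : List Int) (res : Int) :
    denote g ((n, cs, b) :: (pn, pcs, pb) :: st') v res =
      denote g ((pn, pcs, max pb ((refRun g cs v b).1 + 1)) :: st') (refRun g cs v b).2 res := by
  rw [denote]

theorem split_some_facts (v : List Int) : ∀ (cs : List Int) (c : Int) (rest : List Int),
    splitFirstUnvisited cs v = some (c, rest) → c ∉ v ∧ rest.length < cs.length := by
  intro cs
  induction cs with
  | nil => intro c rest h; simp [splitFirstUnvisited] at h
  | cons c0 cs' ih =>
    intro c rest h
    by_cases hc : c0 ∈ v
    · rw [splitFirstUnvisited, if_pos hc] at h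
      obtain ⟨h1, h2⟩ := ih c rest h
      exact ⟨h1, Nat.lt_succ_of_lt h2⟩
    · rw [splitFirstUnvisited, if_neg hc] at h
      obtain ⟨rfl, rfl⟩ : c0 = c ∧ cs' = rest := by simpa using h
      exact ⟨hc, Nat.lt_succ_self _⟩

theorem refRun_split_none (g : List (Int × List Int)) (v : List Int) :
    ∀ (cs : List Int) (t : Int), splitFirstUnvisited cs v = none → refRun g cs v t = (t, v) := by
  intro cs
  induction cs with
  | nil => intro t _; exact refRun_nil g v t
  | cons c0 cs' ih =>
    intro t h
    by_cases hc : c0 ∈ v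
    · rw [splitFirstUnvisited, if_pos hc] at h
      rw [refRun_cons_mem g hc]
      exact ih t h
    · rw [splitFirstUnvisited, if_neg hc] at h
      cases h

theorem refRun_split_some (g : List (Int × List Int)) (v : List Int) (c : Int) (rest : List Int) :
    ∀ (cs : List Int) (t : Int), splitFirstUnvisited cs v = some (c, rest) →
    refRun g cs v t =
      refRun g rest (refRun g ((adjOf g c).getD []) (PySem.Set.add v c) 0).2
        (max t ((refRun g ((adjOf g c).getD []) (PySem.Set.add v c) 0).1 + 1)) := by
  intro cs
  induction cs with
  | nil => intro t h; simp [splitFirstUnvisited] at h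
  | cons c0 cs' ih =>
    intro t h
    by_cases hc : c0 ∈ v
    · rw [splitFirstUnvisited, if_pos hc] at h
      rw [refRun_cons_mem g hc]
      exact ih t h
    · rw [splitFirstUnvisited, if_neg hc] at h
      obtain ⟨rfl, rfl⟩ : c0 = c ∧ cs' = rest := by simpa using h
      cases hk : adjOf g c0 with
      | none =>
        rw [refRun_cons_nonkey g hc hk]
        simp [refRun_nil]
      | some ccs =>
        rw [refRun_cons_key g hc hk]
        rfl

-- A's recursion computes the reference DFS whenever the fuel exceeds the number of
-- unvisited keys
theorem LA (g : List (Int × List Int)) : ∀ (cs v : List Int) (t : Int) (f : Nat),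
    uK g v < f → childLoopA f g cs t v = refRun g cs v t := by
  intro cs v t
  unfold refRun
  fun_induction refGo g cs v t with
  | case1 v t =>
    intro f _
    rw [childLoopA]
  | case2 v t c cs' hc ih =>
    intro f hf
    rw [childLoopA, if_pos hc]
    exact ih f hf
  | case3 v t c cs' hc hk r ih =>
    intro f hf
    cases f with
    | zero => exact absurd hf (Nat.not_lt_zero _)
    | succ f' =>
      rw [childLoopA, if_neg hc]
      simp only [dfsRecA, hk]
      exact ih (f' + 1) (by rw [uK_add_nonkey g v c hk]; exact hf)
  | case4 v t c cs' hc ccs hk r1 r2 ih3 ih2 ih1 =>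
    intro f hf
    cases f with
    | zero => exact absurd hf (Nat.not_lt_zero _)
    | succ f' =>
      rw [childLoopA, if_neg hc]
      simp only [dfsRecA, hk]
      have hkey := uK_add_key_lt g v c ccs hk hc
      have hlt : uK g (PySem.Set.add v c) < f' := by omega
      rw [ih3 f' hlt]
      refine ih1 (f' + 1) ?_
      have h1 := uK_mono g (PySem.Set.add v c) (↑(refGo g ccs (PySem.Set.add v c) 0) : Int × List Int).2
        (refGo g ccs (PySem.Set.add v c) 0).2
      omega

-- B's machine computes `denote` whenever the fuel exceeds the potential phiB
theorem LB (g : List (Int × List Int)) : ∀ (fuel : Nat) (stack : List (Int × List Int × Int))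
    (v : List Int) (res : Int), phiB g stack v < fuel →
    runB g fuel stack v res = denote g stack v res := by
  intro fuel stack v res
  fun_induction runB g fuel stack v res with
  | case1 v res => intro _; rw [denote_nil]
  | case2 v res n children best st c rest hsplit =>
    intro h
    exact absurd h (Nat.not_lt_zero _)
  | case3 v res n children best st c rest hsplit f ih =>
    intro h
    obtain ⟨hcv, hlen⟩ := split_some_facts v children c rest hsplit
    have hpush : phiB g ((c, (adjOf g c).getD [], 0) :: (n, rest, best) :: st) (PySem.Set.add v c) < f := by
      cases hk : adjOf g c with
      | none =>
        have hW := W_add_nonkey g v c hk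
        simp only [phiB, List.map_cons, List.sum_cons, Option.getD_none, List.length_nil, hW] at h ⊢
        omega
      | some ccs =>
        have hW := W_add_key g v c ccs hk hcv
        simp only [phiB, List.map_cons, List.sum_cons, Option.getD_some] at h ⊢
        omega
    rw [ih hpush]
    have hpair := refRun_split_some g v c rest children best hsplit
    cases st with
    | nil => rw [denote_cons2, denote_single, denote_single, hpair]
    | cons p st' =>
      obtain ⟨pn, pcs, pb⟩ := p
      rw [denote_cons2, denote_cons2, denote_cons2, hpair]
  | case4 fuel v res n children best hsplit pn pcs pb st' ih =>
    intro h
    have hpop : phiB g ((pn, pcs, max pb (best + 1)) :: st') v < fuel := by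
      simp only [phiB, List.map_cons, List.sum_cons] at h ⊢
      omega
    rw [ih hpop, denote_cons2, refRun_split_none g v children best hsplit]
  | case5 fuel v res n children best hsplit ih =>
    intro h
    have hfin : phiB g [] v < fuel := by
      simp only [phiB, List.map_cons, List.sum_cons, List.map_nil, List.sum_nil] at h ⊢
      omega
    rw [ih hfin, denote_nil, denote_single, refRun_split_none g v children best hsplit]

theorem uK_lt_length (g : List (Int × List Int)) (v : List Int) (n : Int) (cs : List Int)
    (hk : adjOf g n = some cs) : uK g (PySem.Set.add v n) < g.length := by
  have hmem : n ∈ PySem.List.dedup (g.map Prod.fst) :=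
    (PySem.List.mem_dedup _ _).2 (mem_keys_of_adjOf_some g n cs hk)
  have hnv : n ∈ PySem.Set.add v n := (PySem.Set.mem_add _ _ _).2 (Or.inr rfl)
  have h1 : uK g (PySem.Set.add v n) < (PySem.List.dedup (g.map Prod.fst)).length := by
    apply List.length_filter_lt_length_iff_exists.2
    exact ⟨n, hmem, by simp [hnv]⟩
  have h2 : (PySem.List.dedup (g.map Prod.fst)).length ≤ g.length := by
    rw [PySem.List.dedup_eq_ofList]
    have := PySem.Set.length_ofList_le (g.map Prod.fst)
    simpa using this
  omega

-- ===== VERDICT (by name: the statement is the Claim_ definition above) =====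
theorem dfs_spec : Claim_equal_dfs := by
  intro g n vis _ _
  unfold Spec_dfs dfs dfs_alt
  show (dfsRecA (g.length + 1) g n (initVisited vis)).1 =
    runB g (phiB g [(n, (adjOf g n).getD [], 0)] (PySem.Set.add (initVisited vis) n) + 1)
      [(n, (adjOf g n).getD [], 0)] (PySem.Set.add (initVisited vis) n) 0
  rw [LB g _ _ _ _ (Nat.lt_succ_self _), denote_single]
  cases hk : adjOf g n with
  | none =>
    rw [dfsRecA, hk]
    simp [refRun_nil]
  | some cs =>
    rw [dfsRecA]
    simp only [hk, Option.getD_some]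
    rw [LA g cs (PySem.Set.add (initVisited vis) n) 0 g.length
      (uK_lt_length g (initVisited vis) n cs hk)]
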